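-- pv_equiv track=rewrite | github.com/hirowa/awesome-scripts | 🤙 Other/Astrological Insights Generator.py | calculate_kua_number
-- ===== SOURCE A (Python) =====
-- def calculate_kua_number(year, gender):
--     last_two_digits = sum(int(digit) for digit in str(year)[-2:])
--     while last_two_digits > 9:
--         last_two_digits = sum(int(digit) for digit in str(last_two_digits))
--     if gender.lower() == 'male':
--         kua_number = 10 - last_two_digits
--     elif gender.lower() == 'female':
--         kua_number = (last_two_digits + 5) % 9
--     if kua_number == 0:
--         kua_number = 9
--     return kua_number
-- ===== SOURCE B (Python) =====
-- def calculate_kua_number(year, gender):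
--     n = abs(year) % 100
--     s = n // 10 + n % 10
--     reduced = s if s <= 9 else s - 9
--     g = gender.lower()
--     if g == 'male':
--         return 10 - reduced
--     if g == 'female':
--         return (reduced + 4) % 9 + 1
--     raise ValueError("gender must be 'male' or 'female'")
-- ===== Notes on version B (the rewrite author's own statement) =====
-- stated objective: simpler
-- what changed: B computes the last-two-digit sum arithmetically from abs(year) % 100 instead of slicing str(year), replaces the digit-summing while-loop with a single conditional subtraction of 9, and folds A's trailing 'if kua == 0: kua = 9' fix-up into the female formula (reduced + 4) % 9 + 1.
import Mathlib
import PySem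

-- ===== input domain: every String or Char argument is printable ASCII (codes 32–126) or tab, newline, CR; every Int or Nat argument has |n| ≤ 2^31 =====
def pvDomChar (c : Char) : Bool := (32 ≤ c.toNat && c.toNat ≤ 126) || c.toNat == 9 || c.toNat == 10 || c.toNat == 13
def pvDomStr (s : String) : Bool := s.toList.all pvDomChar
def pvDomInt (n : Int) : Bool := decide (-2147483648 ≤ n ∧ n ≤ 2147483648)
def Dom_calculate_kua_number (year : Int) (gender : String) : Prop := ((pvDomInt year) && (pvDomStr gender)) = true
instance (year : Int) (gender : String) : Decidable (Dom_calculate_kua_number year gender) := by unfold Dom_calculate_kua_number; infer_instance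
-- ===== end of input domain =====

-- B replaces A's string-based last-two-digit extraction and digit-summing while-loop with
-- plain arithmetic (abs(year) % 100, one subtraction of 9) — objective: simpler.

-- ===== PORT A =====

-- int(digit) for a single character: `.getD 0` is unreachable inside Pre_ (all sliced chars are digits there)
def kuaCharInt (c : Char) : Int := (PySem.Int.ofChars? [c]).getD 0

-- sum(int(digit) for digit in cs)
def kuaDigitSum (cs : List Char) : Int := (cs.map kuaCharInt).sum

-- the `while last_two_digits > 9` loop, with fuel (the loop always terminates quickly; fuel never runs out inside Pre_)
def kuaWhile : Nat → Int → Int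
  | 0, v => v
  | f + 1, v => if v > 9 then kuaWhile f (kuaDigitSum (PySem.Int.toChars v)) else v

def calculate_kua_number (year : Int) (gender : String) : Int :=
  let last_two_digits0 := kuaDigitSum (PySem.List.slice (PySem.Int.toChars year) (some (-2)) none)
  let last_two_digits := kuaWhile 100 last_two_digits0
  let kua_number :=
    if PySem.Str.lower gender = "male" then 10 - last_two_digits
    else if PySem.Str.lower gender = "female" then PySem.Int.mod (last_two_digits + 5) 9
    else 0  -- Python: UnboundLocalError; outside Pre_
  if kua_number = 0 then 9 else kua_number

-- ===== PORT B =====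

def calculate_kua_number_alt (year : Int) (gender : String) : Int :=
  let n := PySem.Int.mod ((year.natAbs : Int)) 100
  let s := PySem.Int.floordiv n 10 + PySem.Int.mod n 10
  let reduced := if s ≤ 9 then s else s - 9
  let g := PySem.Str.lower gender
  if g = "male" then 10 - reduced
  else if g = "female" then PySem.Int.mod (reduced + 4) 9 + 1
  else 0  -- Python: raise ValueError; outside Pre_

-- ===== PRECONDITION & SPEC =====
-- Pre_ excludes exactly the inputs where A raises: years -9..-1 (int('-') → ValueError on the
-- sliced minus sign) and genders other than male/female (UnboundLocalError).
def Pre_calculate_kua_number (year : Int) (gender : String) : Prop :=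
  (0 ≤ year ∨ year ≤ -10) ∧
  (PySem.Str.lower gender = "male" ∨ PySem.Str.lower gender = "female")
instance (year : Int) (gender : String) : Decidable (Pre_calculate_kua_number year gender) := by unfold Pre_calculate_kua_number; infer_instance

def pvWitness_calculate_kua_number : Int × String := (1987, "female")

def Spec_calculate_kua_number (year : Int) (gender : String) (out : Int) : Prop := out = calculate_kua_number_alt year gender
instance (year : Int) (gender : String) (out : Int) : Decidable (Spec_calculate_kua_number year gender out) := by unfold Spec_calculate_kua_number; infer_instance

-- ===== CLAIM (what is proved, stated in full; the proofs are below) =====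
def Claim_equal_calculate_kua_number : Prop := ∀ (year : Int) (gender : String), Dom_calculate_kua_number year gender → Pre_calculate_kua_number year gender → Spec_calculate_kua_number year gender (calculate_kua_number year gender)
-- ===== LEMMAS AND PROOFS =====

-- Nat.toDigitsCore is fuel-irrelevant once the fuel exceeds n
lemma kua_toDigitsCore_fuel (n : Nat) : ∀ f₁ f₂ r, n < f₁ → n < f₂ →
    Nat.toDigitsCore 10 f₁ n r = Nat.toDigitsCore 10 f₂ n r := by
  induction n using Nat.strong_induction_on with
  | _ n ih =>
    intro f₁ f₂ r h₁ h₂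
    match f₁, f₂ with
    | g₁ + 1, g₂ + 1 =>
      simp only [Nat.toDigitsCore]
      by_cases h : n / 10 = 0
      · simp [h]
      · simp only [h, if_false]
        have hlt : n / 10 < n := Nat.div_lt_self (Nat.pos_of_ne_zero (by omega)) (by omega)
        exact ih _ hlt _ _ _ (by omega) (by omega)

lemma kua_toDigitsCore_append (f : Nat) : ∀ n r, Nat.toDigitsCore 10 f n r = Nat.toDigitsCore 10 f n [] ++ r := by
  induction f with
  | zero => intro n r; simp [Nat.toDigitsCore]
  | succ f ih =>
    intro n r
    simp only [Nat.toDigitsCore]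
    by_cases h : n / 10 = 0
    · simp [h]
    · simp only [h, if_false]
      rw [ih (n / 10) (Nat.digitChar (n % 10) :: r), ih (n / 10) [Nat.digitChar (n % 10)]]
      simp

lemma kua_toDigits_step {m : Nat} (h : 10 ≤ m) :
    Nat.toDigits 10 m = Nat.toDigits 10 (m / 10) ++ [Nat.digitChar (m % 10)] := by
  have hne : m / 10 ≠ 0 := by omega
  have h1 : Nat.toDigitsCore 10 (m + 1) m [] = Nat.toDigitsCore 10 m (m / 10) [Nat.digitChar (m % 10)] := by
    simp only [Nat.toDigitsCore, hne, if_false]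
  calc Nat.toDigits 10 m = Nat.toDigitsCore 10 (m + 1) m [] := rfl
    _ = Nat.toDigitsCore 10 m (m / 10) [Nat.digitChar (m % 10)] := h1
    _ = Nat.toDigitsCore 10 m (m / 10) [] ++ [Nat.digitChar (m % 10)] := kua_toDigitsCore_append m (m / 10) _
    _ = Nat.toDigitsCore 10 (m / 10 + 1) (m / 10) [] ++ [Nat.digitChar (m % 10)] := by
        rw [kua_toDigitsCore_fuel (m / 10) m (m / 10 + 1) []
          (Nat.div_lt_self (by omega) (by omega)) (Nat.lt_succ_self _)]
    _ = Nat.toDigits 10 (m / 10) ++ [Nat.digitChar (m % 10)] := rfl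

lemma kua_toDigits_small {m : Nat} (h : m < 10) : Nat.toDigits 10 m = [Nat.digitChar m] := by
  have h0 : m / 10 = 0 := by omega
  simp [Nat.toDigits, Nat.toDigitsCore, h0, Nat.mod_eq_of_lt h]

lemma kua_charInt_digitChar {d : Nat} (h : d < 10) : kuaCharInt (Nat.digitChar d) = (d : Int) := by
  interval_cases d <;> decide

lemma kua_toDigits_len_pos (m : Nat) : 1 ≤ (Nat.toDigits 10 m).length := by
  by_cases h : m < 10
  · rw [kua_toDigits_small h]; simp
  · rw [kua_toDigits_step (by omega)]; simp

lemma kua_sum_one {a : Nat} (ha : a < 10) : kuaDigitSum [Nat.digitChar a] = (a : Int) := by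
  simp [kuaDigitSum, kua_charInt_digitChar ha]

lemma kua_sum_pair {a b : Nat} (ha : a < 10) (hb : b < 10) :
    kuaDigitSum [Nat.digitChar a, Nat.digitChar b] = (a : Int) + (b : Int) := by
  simp [kuaDigitSum, kua_charInt_digitChar ha, kua_charInt_digitChar hb]

-- digit sum of the last two characters of the decimal representation
lemma kua_lastTwo_sum (m : Nat) :
    kuaDigitSum ((Nat.toDigits 10 m).drop ((Nat.toDigits 10 m).length - 2))
      = ((m % 100 / 10 : Nat) : Int) + ((m % 10 : Nat) : Int) := by
  by_cases h1 : m < 10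
  · rw [kua_toDigits_small h1]
    have hd : ([Nat.digitChar m]).drop (([Nat.digitChar m]).length - 2) = [Nat.digitChar m] := rfl
    rw [hd, kua_sum_one h1]
    push_cast
    omega
  · by_cases h2 : m < 100
    · rw [kua_toDigits_step (by omega), kua_toDigits_small (show m / 10 < 10 by omega)]
      have hd : ([Nat.digitChar (m / 10)] ++ [Nat.digitChar (m % 10)]).drop
          (([Nat.digitChar (m / 10)] ++ [Nat.digitChar (m % 10)]).length - 2)
          = [Nat.digitChar (m / 10), Nat.digitChar (m % 10)] := rfl
      rw [hd, kua_sum_pair (show m / 10 < 10 by omega) (show m % 10 < 10 by omega)]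
      push_cast
      omega
    · rw [kua_toDigits_step (show 10 ≤ m by omega),
        kua_toDigits_step (show 10 ≤ m / 10 by omega)]
      have hlen := kua_toDigits_len_pos (m / 10 / 10)
      set L := Nat.toDigits 10 (m / 10 / 10) with hL
      have hdrop : ((L ++ [Nat.digitChar (m / 10 % 10)]) ++ [Nat.digitChar (m % 10)]).drop
          (((L ++ [Nat.digitChar (m / 10 % 10)]) ++ [Nat.digitChar (m % 10)]).length - 2)
          = [Nat.digitChar (m / 10 % 10), Nat.digitChar (m % 10)] := by
        rw [List.append_assoc]
        have hl2 : (L ++ ([Nat.digitChar (m / 10 % 10)] ++ [Nat.digitChar (m % 10)])).length - 2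
            = L.length := by simp
        rw [hl2, List.drop_append_of_le_length (le_refl _), List.drop_length]
        simp
      rw [hdrop, kua_sum_pair (show m / 10 % 10 < 10 by omega) (show m % 10 < 10 by omega)]
      push_cast
      omega

-- the reduction loop on a digit sum of two decimal digits
lemma kua_while_eval {s : Int} (h0 : 0 ≤ s) (h18 : s ≤ 18) :
    kuaWhile 100 s = if s ≤ 9 then s else s - 9 := by
  interval_cases s <;> decide

-- A's initial digit sum, as arithmetic on m = |year|
lemma kua_A_sum (year : Int) (hpre : 0 ≤ year ∨ year ≤ -10) :
    kuaDigitSum (PySem.List.slice (PySem.Int.toChars year) (some (-2)) none)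
      = ((year.natAbs % 100 / 10 : Nat) : Int) + ((year.natAbs % 10 : Nat) : Int) := by
  rw [PySem.List.slice_from_neg_ofNat _ 2 (by omega)]
  rcases hpre with h | h
  · have hneg : ¬ year < 0 := by omega
    have habs : year.toNat = year.natAbs := by omega
    simp only [PySem.Int.toChars, hneg, if_false, habs]
    exact kua_lastTwo_sum year.natAbs
  · have hneg : year < 0 := by omega
    have h10 : 10 ≤ year.natAbs := by omega
    simp only [PySem.Int.toChars, hneg, if_true]
    set L := Nat.toDigits 10 year.natAbs with hL
    have hlen : 2 ≤ L.length := by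
      rw [hL, kua_toDigits_step h10]
      have := kua_toDigits_len_pos (year.natAbs / 10)
      simp; omega
    have : ('-' :: L).length - 2 = (L.length - 2) + 1 := by simp; omega
    rw [this, List.drop_succ_cons]
    exact kua_lastTwo_sum year.natAbs

-- ===== VERDICT (by name: the statement is the Claim_ definition above) =====
theorem calculate_kua_number_spec : Claim_equal_calculate_kua_number := by
  intro year gender _ hpre
  obtain ⟨hy, hg⟩ := hpre
  unfold Spec_calculate_kua_number calculate_kua_number calculate_kua_number_alt
  simp only
  rw [kua_A_sum year hy]
  set m := year.natAbs with hm
  -- B's n and s coincide with A's initial digit sum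
  have hn : PySem.Int.mod ((m : Nat) : Int) 100 = ((m % 100 : Nat) : Int) := by
    rw [PySem.Int.mod_eq_emod_of_pos (by omega : (0:Int) < 100)]
    omega
  have hsB : PySem.Int.floordiv (((m % 100 : Nat) : Int)) 10 + PySem.Int.mod (((m % 100 : Nat) : Int)) 10
      = ((m % 100 / 10 : Nat) : Int) + ((m % 10 : Nat) : Int) := by
    rw [PySem.Int.floordiv_eq_ediv_of_pos (by omega : (0:Int) < 10), PySem.Int.mod_eq_emod_of_pos (by omega : (0:Int) < 10)]
    omega
  rw [hn, hsB]
  set s : Int := ((m % 100 / 10 : Nat) : Int) + ((m % 10 : Nat) : Int) with hs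
  have hs0 : 0 ≤ s := by positivity
  have hs18 : s ≤ 18 := by
    have h1 : m % 100 / 10 ≤ 9 := by omega
    have h2 : m % 10 ≤ 9 := by omega
    rw [hs]; push_cast; omega
  rw [kua_while_eval hs0 hs18]
  set r : Int := if s ≤ 9 then s else s - 9 with hr
  have hr0 : 0 ≤ r := by rw [hr]; split_ifs <;> omega
  have hr9 : r ≤ 9 := by rw [hr]; split_ifs <;> omega
  clear_value r
  rcases hg with h | h
  · -- male
    simp only [h, if_true]
    rw [if_neg (show ¬ (10 - r = 0) by omega)]
  · -- female
    have hmale : ¬ (PySem.Str.lower gender = "male") := by rw [h]; decide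
    rw [if_neg hmale, if_neg hmale, if_pos h, if_pos h]
    have hcase : r = 0 ∨ r = 1 ∨ r = 2 ∨ r = 3 ∨ r = 4 ∨ r = 5 ∨ r = 6 ∨ r = 7 ∨ r = 8 ∨ r = 9 := by
      omega
    rcases hcase with h' | h' | h' | h' | h' | h' | h' | h' | h' | h' <;> rw [h'] <;> decide
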